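-- pv_equiv track=rewrite | github.com/NavneetKanna/dlgrad | dlgrad/helpers.py | get_broadcast_strides
-- ===== SOURCE A (Python) =====
-- def get_broadcast_strides(src_shape: tuple, dst_shape: tuple) -> tuple:
--     """
--     Calculates strides for src_shape as if it were broadcast to dst_shape.
--     Returns a tuple of strides matching the length of dst_shape.
--     """
--     base_strides = calculate_stride(src_shape)
--     ndim_diff = len(dst_shape) - len(src_shape)
--     aligned_src_shape = (1,) * ndim_diff + src_shape
--     aligned_src_strides = (0,) * ndim_diff + base_strides
--     final_strides = []
--
--     for dim_src, dim_dst, stride_src in zip(aligned_src_shape, dst_shape, aligned_src_strides):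
--         if dim_src == dim_dst:
--             final_strides.append(stride_src)
--         elif dim_src == 1:
--             final_strides.append(0)
--         else:
--             raise ValueError(f"Shape mismatch: {src_shape} cannot be broadcast to {dst_shape}")
--     return tuple(final_strides)
--
-- def calculate_stride(shape: tuple|int) -> tuple:
--     if not shape:
--         return tuple()
--
--     stride = []
--     stride_value = 1
--     for dim in reversed(shape):
--         stride.append(stride_value)
--         stride_value *= dim
--
--     return tuple(reversed(stride))
-- ===== SOURCE B (Python) =====
-- def get_broadcast_strides(src_shape: tuple, dst_shape: tuple) -> tuple:
--     """Single reverse pass: running stride computed on the fly, no stride table."""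
--     n_dst, n_src = len(dst_shape), len(src_shape)
--     pad = max(0, n_dst - n_src)
--     res = [0] * n_dst
--     stride_value = 1
--     for m in range(n_src - 1, -1, -1):
--         k = m + pad
--         if k < n_dst:
--             if src_shape[m] == dst_shape[k]:
--                 res[k] = stride_value
--             elif src_shape[m] == 1:
--                 res[k] = 0
--             else:
--                 raise ValueError(f"Shape mismatch: {src_shape} cannot be broadcast to {dst_shape}")
--         stride_value *= src_shape[m]
--     return tuple(res)
-- ===== Notes on version B (the rewrite author's own statement) =====
-- stated objective: simpler
-- what changed: Replaces the two-phase approach (separate calculate_stride table, left-padded alignment tuples, forward zip loop) with a single reverse pass that computes the running stride on the fly and writes into a preallocated result.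
import Mathlib
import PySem

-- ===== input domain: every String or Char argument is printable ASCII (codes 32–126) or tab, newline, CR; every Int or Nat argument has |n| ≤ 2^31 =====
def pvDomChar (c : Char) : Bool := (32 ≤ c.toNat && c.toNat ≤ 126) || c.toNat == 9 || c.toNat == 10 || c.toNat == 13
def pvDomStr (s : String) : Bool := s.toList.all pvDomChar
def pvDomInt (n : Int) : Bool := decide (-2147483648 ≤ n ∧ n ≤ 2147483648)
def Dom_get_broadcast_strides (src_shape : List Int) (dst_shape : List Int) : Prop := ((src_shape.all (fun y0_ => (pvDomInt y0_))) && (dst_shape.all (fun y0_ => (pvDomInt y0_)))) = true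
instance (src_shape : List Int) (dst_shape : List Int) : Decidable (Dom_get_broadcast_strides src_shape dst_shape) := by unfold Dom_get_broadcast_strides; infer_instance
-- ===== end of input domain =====

-- B replaces A's stride table + alignment tuples + forward zip by one reverse pass
-- with a running stride (simpler decomposition; same return value wherever A returns).

-- ===== PORT A =====
def pvCalculateStride (shape : List Int) : List Int :=
  if shape = [] then []
  else
    let p := shape.reverse.foldl
      (fun (p : List Int × Int) dim => (p.1 ++ [p.2], p.2 * dim)) ([], 1)
    p.1.reverse

def get_broadcast_strides (src_shape : List Int) (dst_shape : List Int) : List Int :=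
  let base_strides := pvCalculateStride src_shape
  let ndim_diff : Int := (dst_shape.length : Int) - (src_shape.length : Int)
  let aligned_src_shape := List.replicate ndim_diff.toNat (1 : Int) ++ src_shape
  let aligned_src_strides := List.replicate ndim_diff.toNat (0 : Int) ++ base_strides
  (aligned_src_shape.zip (dst_shape.zip aligned_src_strides)).foldl
    (fun acc x =>
      if x.1 = x.2.1 then acc ++ [x.2.2]
      else if x.1 = 1 then acc ++ [(0 : Int)]
      else acc ++ [(0 : Int)])   -- Python raises ValueError here; such inputs are outside Pre_
    []

-- ===== PORT B =====
def get_broadcast_strides_alt (src_shape : List Int) (dst_shape : List Int) : List Int :=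
  let nDst := dst_shape.length
  let nSrc := src_shape.length
  let pad := nDst - nSrc   -- Nat subtraction = max(0, n_dst - n_src)
  let p := (List.range nSrc).reverse.foldl
    (fun (p : List Int × Int) m =>
      let k := m + pad
      let r := if k < nDst then
          p.1.set k (if src_shape.getD m 0 = dst_shape.getD k 0 then p.2
                     else if src_shape.getD m 0 = 1 then 0
                     else 0)   -- Python raises ValueError here; such inputs are outside Pre_
        else p.1
      (r, p.2 * src_shape.getD m 0))
    (List.replicate nDst (0 : Int), 1)
  p.1

-- ===== PRECONDITION & SPEC =====
-- Pre_ excludes exactly the inputs on which A raises ValueError (a dimension that is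
-- neither equal to the destination dimension nor 1); B raises there too.
def Pre_get_broadcast_strides (src_shape : List Int) (dst_shape : List Int) : Prop :=
  ∀ k ∈ List.range dst_shape.length,
    (if k < dst_shape.length - src_shape.length then (1 : Int)
     else src_shape.getD (k - (dst_shape.length - src_shape.length)) 0) = dst_shape.getD k 0 ∨
    (if k < dst_shape.length - src_shape.length then (1 : Int)
     else src_shape.getD (k - (dst_shape.length - src_shape.length)) 0) = 1

instance (src_shape : List Int) (dst_shape : List Int) : Decidable (Pre_get_broadcast_strides src_shape dst_shape) := by
  unfold Pre_get_broadcast_strides; infer_instance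

def pvWitness_get_broadcast_strides : List Int × List Int := ([2, 3], [4, 2, 3])

def Spec_get_broadcast_strides (src_shape : List Int) (dst_shape : List Int) (out : List Int) : Prop := out = get_broadcast_strides_alt src_shape dst_shape
instance (src_shape : List Int) (dst_shape : List Int) (out : List Int) : Decidable (Spec_get_broadcast_strides src_shape dst_shape out) := by unfold Spec_get_broadcast_strides; infer_instance

-- ===== CLAIM (what is proved, stated in full; the proofs are below) =====
def Claim_equal_get_broadcast_strides : Prop := ∀ (src_shape : List Int) (dst_shape : List Int), Dom_get_broadcast_strides src_shape dst_shape → Pre_get_broadcast_strides src_shape dst_shape → Spec_get_broadcast_strides src_shape dst_shape (get_broadcast_strides src_shape dst_shape)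

-- ===== LEMMAS AND PROOFS =====

-- Common closed form both ports are proved equal to (unconditionally).
def pvF (src dst : List Int) : List Int :=
  (List.range dst.length).map (fun k =>
    if k < dst.length - src.length then (0 : Int)
    else if src.getD (k - (dst.length - src.length)) 0 = dst.getD k 0
         then (src.drop (k - (dst.length - src.length) + 1)).prod else 0)

theorem pv_foldl_app {α : Type} (g : α → Int) :
    ∀ (l : List α) (acc : List Int),
      l.foldl (fun a x => a ++ [g x]) acc = acc ++ l.map g := by
  intro l
  induction l with
  | nil => simp
  | cons x xs ih => intro acc; simp [List.foldl, ih]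

theorem pv_stride_fold :
    ∀ (ys : List Int) (acc : List Int) (v : Int),
      ys.foldl (fun (p : List Int × Int) dim => (p.1 ++ [p.2], p.2 * dim)) (acc, v)
      = (acc ++ (List.range ys.length).map (fun j => v * (ys.take j).prod), v * ys.prod) := by
  intro ys
  induction ys with
  | nil => intro acc v; simp
  | cons d ys ih =>
    intro acc v
    simp only [List.foldl_cons, ih]
    refine Prod.ext ?_ ?_
    · show acc ++ [v] ++ _ = acc ++ _
      rw [List.length_cons, List.range_succ_eq_map]
      simp [List.map_map, Function.comp_def, mul_assoc, List.append_assoc]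
    · show v * d * ys.prod = v * (d :: ys).prod
      simp [mul_assoc]

theorem pv_calc_eq (src : List Int) :
    pvCalculateStride src
      = (List.range src.length).map (fun j => (src.drop (j + 1)).prod) := by
  unfold pvCalculateStride
  by_cases h : src = []
  · simp [h]
  · simp only [h, if_false]
    rw [pv_stride_fold]
    apply List.ext_getElem
    · simp
    · intro j h1 h2
      simp only [List.getElem_reverse, List.length_map, List.length_range, List.nil_append,
        List.getElem_map, List.getElem_range, List.length_reverse] at *
      rw [one_mul, List.take_reverse, List.prod_reverse]
      have hj : j < src.length := by simpa using h2
      have : src.length - (src.length - 1 - j) = j + 1 := by omega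
      rw [this]

theorem pvA_eq_F (src dst : List Int) : get_broadcast_strides src dst = pvF src dst := by
  have hfun : (fun (acc : List Int) (x : Int × Int × Int) =>
      if x.1 = x.2.1 then acc ++ [x.2.2] else if x.1 = 1 then acc ++ [(0:Int)] else acc ++ [(0:Int)])
      = fun acc x => acc ++ [if x.1 = x.2.1 then x.2.2 else if x.1 = 1 then 0 else 0] := by
    funext acc x; split_ifs <;> rfl
  have hpad : ((dst.length : Int) - (src.length : Int)).toNat = dst.length - src.length := by
    omega
  unfold get_broadcast_strides
  simp only [hfun, pv_foldl_app, pv_calc_eq, List.nil_append, hpad]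
  apply List.ext_getElem
  · simp [pvF]; omega
  · intro k h1 h2
    have hk : k < dst.length := by simp [pvF] at h2; omega
    simp only [pvF, List.getElem_map, List.getElem_zip, List.getElem_range, List.getElem_append]
    by_cases hlt : k < dst.length - src.length
    · simp only [List.length_replicate, hlt, dite_true, List.getElem_replicate]
      split_ifs <;> rfl
    · have hs : k - (dst.length - src.length) < src.length := by omega
      simp only [List.length_replicate, if_neg hlt]
      rw [dif_neg (by omega : ¬ k < dst.length - src.length), dif_neg (by omega : ¬ k < dst.length - src.length)]
      rw [List.getD_eq_getElem _ _ hs, List.getD_eq_getElem _ _ hk]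
      split_ifs <;> rfl

theorem pv_loopB (src dst : List Int) :
    ∀ (t : Nat), t ≤ src.length → ∀ (res : List Int) (v : Int), res.length = dst.length →
    (((List.range t).reverse.foldl
      (fun (p : List Int × Int) m =>
        let k := m + (dst.length - src.length)
        let r := if k < dst.length then
            p.1.set k (if src.getD m 0 = dst.getD k 0 then p.2
                       else if src.getD m 0 = 1 then 0
                       else 0)
          else p.1
        (r, p.2 * src.getD m 0))
      (res, v)).2 = v * (src.take t).prod) ∧
    (((List.range t).reverse.foldl
      (fun (p : List Int × Int) m =>
        let k := m + (dst.length - src.length)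
        let r := if k < dst.length then
            p.1.set k (if src.getD m 0 = dst.getD k 0 then p.2
                       else if src.getD m 0 = 1 then 0
                       else 0)
          else p.1
        (r, p.2 * src.getD m 0))
      (res, v)).1.length = dst.length) ∧
    ∀ k, (((List.range t).reverse.foldl
      (fun (p : List Int × Int) m =>
        let k := m + (dst.length - src.length)
        let r := if k < dst.length then
            p.1.set k (if src.getD m 0 = dst.getD k 0 then p.2
                       else if src.getD m 0 = 1 then 0
                       else 0)
          else p.1
        (r, p.2 * src.getD m 0))
      (res, v)).1.getD k 0) =
      if (dst.length - src.length) ≤ k ∧ k < (dst.length - src.length) + t ∧ k < dst.length then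
        (if src.getD (k - (dst.length - src.length)) 0 = dst.getD k 0
         then v * ((src.take t).drop (k - (dst.length - src.length) + 1)).prod else 0)
      else res.getD k 0 := by
  intro t
  induction t with
  | zero =>
    intro _ res v hres
    refine ⟨by simp, by simpa using hres, ?_⟩
    intro k
    simp only [List.range_zero, List.reverse_nil, List.foldl_nil]
    have : ¬ ((dst.length - src.length) ≤ k ∧ k < (dst.length - src.length) + 0 ∧ k < dst.length) := by omega
    rw [if_neg this]
  | succ t ih =>
    intro ht res v hres
    have hts : t < src.length := ht
    have hgt : src.getD t 0 = src[t] := List.getD_eq_getElem _ _ hts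
    have htake : src.take (t+1) = src.take t ++ [src[t]] := by
      rw [List.take_add_one, List.getElem?_eq_getElem hts]; rfl
    simp only [List.range_succ, List.reverse_append, List.reverse_cons, List.reverse_nil,
      List.nil_append, List.singleton_append, List.foldl_cons]
    obtain ⟨ih2, ih1, ih3⟩ := ih (Nat.le_of_lt hts)
      (if t + (dst.length - src.length) < dst.length then
          res.set (t + (dst.length - src.length))
            (if src.getD t 0 = dst.getD (t + (dst.length - src.length)) 0 then v
             else if src.getD t 0 = 1 then 0 else 0)
        else res)
      (v * src.getD t 0)
      (by split <;> simp [hres])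
    refine ⟨?_, ?_, ?_⟩
    · rw [ih2, htake]
      simp only [List.prod_append, List.prod_cons, List.prod_nil, hgt]
      ring
    · exact ih1
    · intro k
      rw [ih3 k]
      by_cases hc : (dst.length - src.length) ≤ k ∧ k < (dst.length - src.length) + t ∧ k < dst.length
      · rw [if_pos hc, if_pos (by omega : (dst.length - src.length) ≤ k ∧ k < (dst.length - src.length) + (t+1) ∧ k < dst.length)]
        have hm : k - (dst.length - src.length) + 1 ≤ (src.take t).length := by
          simp only [List.length_take]; omega
        rw [htake, List.drop_append_of_le_length hm]
        simp only [List.prod_append, List.prod_cons, List.prod_nil, mul_one, hgt]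
        split_ifs with h0
        · ring
        · rfl
      · rw [if_neg hc]
        by_cases hk : k = t + (dst.length - src.length) ∧ k < dst.length
        · obtain ⟨hk1, hk2⟩ := hk
          rw [if_pos (by omega : t + (dst.length - src.length) < dst.length)]
          rw [if_pos (by omega : (dst.length - src.length) ≤ k ∧ k < (dst.length - src.length) + (t+1) ∧ k < dst.length)]
          rw [List.getD_eq_getElem?_getD, hk1, List.getElem?_set_self (by omega : t + (dst.length - src.length) < res.length)]
          have hkp : k - (dst.length - src.length) = t := by omega
          have hdl : ((src.take (t+1)).drop (t+1)) = [] := by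
            apply List.drop_eq_nil_of_le
            simp only [List.length_take]; omega
          have hsim : t + (dst.length - src.length) - (dst.length - src.length) = t := by omega
          simp only [Option.getD_some, hsim, hdl, List.prod_nil, mul_one]
          split_ifs <;> rfl
        · rw [if_neg (by omega : ¬ ((dst.length - src.length) ≤ k ∧ k < (dst.length - src.length) + (t+1) ∧ k < dst.length))]
          split
          · next h =>
            rw [List.getD_eq_getElem?_getD, List.getElem?_set_ne (by omega : t + (dst.length - src.length) ≠ k), ← List.getD_eq_getElem?_getD]
          · rfl

theorem pvB_eq_F (src dst : List Int) : get_broadcast_strides_alt src dst = pvF src dst := by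
  obtain ⟨h2, h1, h3⟩ := pv_loopB src dst src.length (Nat.le_refl _)
    (List.replicate dst.length (0 : Int)) 1 (by simp)
  show (((List.range src.length).reverse.foldl
      (fun (p : List Int × Int) m =>
        let k := m + (dst.length - src.length)
        let r := if k < dst.length then
            p.1.set k (if src.getD m 0 = dst.getD k 0 then p.2
                       else if src.getD m 0 = 1 then 0
                       else 0)
          else p.1
        (r, p.2 * src.getD m 0))
      (List.replicate dst.length (0 : Int), 1)).1) = pvF src dst
  apply List.ext_getElem
  · rw [h1]; simp [pvF]
  · intro k hL hR
    have hk : k < dst.length := by rw [h1] at hL; exact hL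
    rw [← List.getD_eq_getElem _ 0 hL, h3 k]
    simp only [pvF, List.getElem_map, List.getElem_range, List.take_length]
    by_cases hlt : k < dst.length - src.length
    · rw [if_neg (by omega), if_pos hlt]
      simp [List.getD_eq_getElem?_getD, hk]
    · rw [if_pos (by omega : dst.length - src.length ≤ k ∧ k < dst.length - src.length + src.length ∧ k < dst.length), if_neg hlt]
      split_ifs <;> simp

-- ===== VERDICT (by name: the statement is the Claim_ definition above) =====
theorem get_broadcast_strides_spec : Claim_equal_get_broadcast_strides := by
  intro src dst _ _
  unfold Spec_get_broadcast_strides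
  rw [pvA_eq_F, pvB_eq_F]
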